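-- pv_equiv track=rewrite | github.com/lilakk/BooookScore | scripts/chunk_data.py | find_puncutations
-- ===== SOURCE A (Python) =====
-- def find_puncutations(text, comma=False):
--     if comma:
--         puncs = ['.', '?', '!', ',']
--     else:
--         puncs = ['.', '?', '!']
--     puncs_idx = []
--     for i, c in enumerate(text):
--         if c in puncs:
--             puncs_idx.append(i)
--     return puncs_idx
-- ===== SOURCE B (Python) =====
-- def find_puncutations(text, comma=False):
--     puncs = ".?!," if comma else ".?!"
--     hits = []
--     for p in puncs:
--         hits.extend(i for i, c in enumerate(text) if c == p)
--     return sorted(hits)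
-- ===== Notes on version B (the rewrite author's own statement) =====
-- stated objective: alternative
-- what changed: B scans the text once per punctuation character collecting positions of that single character, then merges the position lists with sorted(), instead of A's single pass with a per-character membership test.
import Mathlib
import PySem

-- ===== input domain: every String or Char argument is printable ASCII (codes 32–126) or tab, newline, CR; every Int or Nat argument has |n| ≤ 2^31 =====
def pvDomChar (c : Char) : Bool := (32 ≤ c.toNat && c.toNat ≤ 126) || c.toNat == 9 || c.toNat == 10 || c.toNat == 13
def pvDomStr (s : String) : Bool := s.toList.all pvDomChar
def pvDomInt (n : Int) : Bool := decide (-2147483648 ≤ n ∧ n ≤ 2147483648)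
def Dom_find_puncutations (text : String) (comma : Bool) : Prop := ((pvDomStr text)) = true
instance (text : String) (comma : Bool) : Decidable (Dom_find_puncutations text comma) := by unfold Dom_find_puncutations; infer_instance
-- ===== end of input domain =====

-- B replaces A's single enumerate pass with a membership test by one scan per punctuation
-- character plus a final sorted() merge (objective: alternative decomposition, same result).

-- ===== PORT A =====
def find_puncutations (text : String) (comma : Bool) : List Int :=
  let puncs : List Char := if comma then ['.', '?', '!', ','] else ['.', '?', '!']
  (PySem.List.enumerate text.toList).foldl
    (fun acc p => if puncs.contains p.2 then acc ++ [p.1] else acc) []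

-- ===== PORT B =====
def find_puncutations_alt (text : String) (comma : Bool) : List Int :=
  let puncs : List Char := if comma then ['.', '?', '!', ','] else ['.', '?', '!']
  let hits : List Int := puncs.foldl
    (fun acc p => acc ++ ((PySem.List.enumerate text.toList).filter (fun q => q.2 == p)).map (·.1)) []
  PySem.List.sorted hits (fun x => x) false

-- ===== PRECONDITION & SPEC =====
def Spec_find_puncutations (text : String) (comma : Bool) (out : List Int) : Prop := out = find_puncutations_alt text comma
instance (text : String) (comma : Bool) (out : List Int) : Decidable (Spec_find_puncutations text comma out) := by unfold Spec_find_puncutations; infer_instance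

-- ===== CLAIM (what is proved, stated in full; the proofs are below) =====
def Claim_equal_find_puncutations : Prop := ∀ (text : String) (comma : Bool), Dom_find_puncutations text comma → Spec_find_puncutations text comma (find_puncutations text comma)

-- ===== LEMMAS AND PROOFS =====

-- disjoint filters concatenated are a permutation of the filter of the disjunction
lemma filter_or_perm {α : Type} (P Q : α → Bool) (h : ∀ x, ¬(P x = true ∧ Q x = true)) :
    ∀ (e : List α), (e.filter (fun x => P x || Q x)).Perm (e.filter P ++ e.filter Q) := by
  intro e
  induction e with
  | nil => simp
  | cons a e ih =>
    by_cases hP : P a = true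
    · have hQ : Q a = false := by
        cases hq : Q a
        · rfl
        · exact absurd ⟨hP, hq⟩ (h a)
      simpa [List.filter_cons, hP, hQ] using ih.cons a
    · simp only [Bool.not_eq_true] at hP
      cases hQ : Q a
      · simpa [List.filter_cons, hP, hQ] using ih
      · have hmid : (a :: (e.filter P ++ e.filter Q)).Perm (e.filter P ++ a :: e.filter Q) :=
          List.perm_middle.symm
        have hfilter : (a :: e).filter P ++ (a :: e).filter Q
            = e.filter P ++ a :: e.filter Q := by
          simp [List.filter_cons, hP, hQ]
        rw [hfilter]
        have hcons : (a :: e).filter (fun x => P x || Q x)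
            = a :: e.filter (fun x => P x || Q x) := by
          simp [List.filter_cons, hP, hQ]
        rw [hcons]
        exact (ih.cons a).trans hmid

-- per-character filters over a duplicate-free character list are a permutation of the membership filter
lemma flatMap_filter_perm {α : Type} (f : α → Char) :
    ∀ (ps : List Char), ps.Nodup → ∀ (e : List α),
    (ps.flatMap (fun p => e.filter (fun q => f q == p))).Perm
      (e.filter (fun q => ps.contains (f q))) := by
  intro ps
  induction ps with
  | nil =>
    intro _ e
    have h : (fun q => List.contains ([] : List Char) (f q)) = (fun _ => false) := by
      funext q; simp
    rw [List.flatMap_nil, h, List.filter_false]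
  | cons p ps ih =>
    intro hnd e
    have hp : p ∉ ps := (List.nodup_cons.mp hnd).1
    have hdisj : ∀ x, ¬((f x == p) = true ∧ ps.contains (f x) = true) := by
      intro x ⟨h1, h2⟩
      have : f x = p := by simpa using h1
      exact hp (by simpa [this] using (List.contains_iff_mem.mp h2))
    have hperm2 : (e.filter (fun q => f q == p) ++ e.filter (fun q => ps.contains (f q))).Perm
        (e.filter (fun q => (p :: ps).contains (f q))) := by
      have h := filter_or_perm (fun q => f q == p) (fun q => ps.contains (f q)) hdisj e
      have heq : (fun q => (p :: ps).contains (f q))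
          = (fun q => (f q == p) || ps.contains (f q)) := by
        funext q; by_cases h : f q = p <;> simp [h]
      rw [heq]; exact h.symm
    rw [List.flatMap_cons]
    exact (List.Perm.append_left _ (ih (List.nodup_cons.mp hnd).2 e)).trans hperm2

theorem find_puncutations_spec_aux (text : String) (comma : Bool) :
    find_puncutations text comma = find_puncutations_alt text comma := by
  unfold find_puncutations find_puncutations_alt
  set puncs : List Char := if comma then ['.', '?', '!', ','] else ['.', '?', '!'] with hpuncs
  have hnd : puncs.Nodup := by
    rw [hpuncs]; cases comma <;> decide
  set e := PySem.List.enumerate text.toList 0 with he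
  -- A's loop is a filter over the enumerate list
  have hA : e.foldl (fun acc p => if puncs.contains p.2 then acc ++ [p.1] else acc) []
      = (e.filter (fun q => puncs.contains q.2)).map (·.1) := by
    simpa using PySem.List.foldl_append_if (fun q => puncs.contains q.2) (·.1) e []
  -- B's loop is a flatMap over the punctuation characters
  have hB : puncs.foldl (fun acc p => acc ++ (e.filter (fun q => q.2 == p)).map (·.1)) []
      = puncs.flatMap (fun p => (e.filter (fun q => q.2 == p)).map (·.1)) := by
    simpa using PySem.List.foldl_append_eq_flatMap
      (fun p => (e.filter (fun q => q.2 == p)).map (·.1)) puncs []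
  -- the two collections are permutations of each other
  have hperm : ((e.filter (fun q => puncs.contains q.2)).map (·.1)).Perm
      (puncs.flatMap (fun p => (e.filter (fun q => q.2 == p)).map (·.1))) := by
    have := (flatMap_filter_perm (fun q : Int × Char => q.2) puncs hnd e).map (·.1)
    simpa [List.map_flatMap] using this.symm
  -- A's list is strictly increasing
  have hpair : ((e.filter (fun q => puncs.contains q.2)).map (·.1)).Pairwise (· < ·) := by
    have h1 : e.Pairwise (fun p q => p.1 < q.1) := PySem.List.pairwise_lt_enumerate _ _
    exact (h1.filter _).map _ (fun a b h => h)
  simp only [hA, hB]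
  exact (PySem.List.sorted_eq_of_perm_of_pairwise_lt _ _ _ hperm hpair).symm

-- ===== VERDICT (by name: the statement is the Claim_ definition above) =====
theorem find_puncutations_spec : Claim_equal_find_puncutations := by
  intro text comma _
  exact find_puncutations_spec_aux text comma
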